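-- pv_equiv track=rewrite | github.com/prithvidiamond1/Ciphers | src/ciphers.py | monoalpha
-- ===== SOURCE A (Python) =====
-- def monoalpha(s,ciphtype):
--     if not s.isalpha():
--         raise
--     s=s.upper()
--     key="QWERTYUIOPASDFGHJKLZXCVBNM"
--     fin=""
--     charsA=[chr(i) for i in range(65,91)]
--     charsB=key
--     if ciphtype=="d":
--         charsA,charsB=charsB,charsA
--
--     for i in s:
--         if i in charsA:
--             ind=charsA.index(i)
--             fin+=charsB[ind]
--         else:
--             fin+=i
--     return fin
-- ===== SOURCE B (Python) =====
-- def monoalpha(s, ciphtype):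
--     if not s.isalpha():
--         raise
--     s = s.upper()
--     key = "QWERTYUIOPASDFGHJKLZXCVBNM"
--     plain = "ABCDEFGHIJKLMNOPQRSTUVWXYZ"
--     src, dst = (key, plain) if ciphtype == "d" else (plain, key)
--     # staged whole-string passes: substitute each alphabet letter in turn,
--     # writing the image in lowercase so later passes cannot re-substitute it,
--     # then uppercase everything at the end.
--     for a, b in zip(src, dst):
--         s = s.replace(a, b.lower())
--     return s.upper()
-- ===== Notes on version B (the rewrite author's own statement) =====
-- stated objective: faster
-- what changed: B inverts the loop structure: instead of A's per-character Python loop with a membership test, a linear .index lookup and string concatenation, B makes 26 staged whole-string replace passes (one per alphabet letter, writing images in lowercase so later passes cannot re-substitute) followed by a final upper(), so no per-character Python-level lookup exists at all.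
import Mathlib
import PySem

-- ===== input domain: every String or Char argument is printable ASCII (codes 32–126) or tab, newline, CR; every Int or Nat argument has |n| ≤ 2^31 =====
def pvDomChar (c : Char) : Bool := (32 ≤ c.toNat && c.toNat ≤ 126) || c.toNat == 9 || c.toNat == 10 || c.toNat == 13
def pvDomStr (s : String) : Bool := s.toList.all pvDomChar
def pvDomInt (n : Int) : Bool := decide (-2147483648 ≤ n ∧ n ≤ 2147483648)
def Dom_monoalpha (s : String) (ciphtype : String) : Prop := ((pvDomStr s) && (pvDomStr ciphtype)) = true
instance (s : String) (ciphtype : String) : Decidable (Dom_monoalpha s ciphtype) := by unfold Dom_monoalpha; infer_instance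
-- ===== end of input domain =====

-- B replaces A's per-character scan (membership test + linear .index + concatenation) by 26 staged
-- whole-string replace passes, one per alphabet letter, writing images in lowercase so later passes
-- cannot re-substitute, then a final upper() (measured constant-factor faster; A raises on non-alphabetic
-- or empty s — excluded by Pre_).

-- ===== PORT A =====
-- literal transliteration: guard, upper, charsA = [chr(i) for i in range(65,91)], optional swap,
-- then a left fold over the characters accumulating `fin`.
-- (`.index`'s result is an Option here; `.getD 0` / `.getD i` stand for the unreachable miss case,
-- since the branch is guarded by the membership test exactly as in Python.)
def monoalpha (s : String) (ciphtype : String) : String :=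
  if !(PySem.Str.strIsalpha s) then ""   -- Python: bare `raise` (excluded by Pre_monoalpha)
  else
    let s := PySem.Str.upper s
    let key : String := "QWERTYUIOPASDFGHJKLZXCVBNM"
    let charsA : List Char := (PySem.List.pyRange 65 91 1).map (fun i => Char.ofNat i.toNat)
    let charsB : List Char := key.toList
    let p := if ciphtype == "d" then (charsB, charsA) else (charsA, charsB)
    let charsA := p.1
    let charsB := p.2
    let fin := s.toList.foldl (fun fin i =>
      if charsA.contains i then
        fin ++ [(PySem.List.pyGet? charsB (((PySem.List.index? charsA i).getD 0 : Nat) : Int)).getD i]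
      else
        fin ++ [i]) []
    String.ofList fin

-- ===== PORT B =====
-- literal transliteration of Source B: guard, upper, choose (src,dst), then a fold over the zipped
-- alphabets performing one whole-string replace per letter (image lowercased), and a final upper.
def monoalpha_alt (s : String) (ciphtype : String) : String :=
  if !(PySem.Str.strIsalpha s) then ""   -- Python: bare `raise` (excluded by Pre_monoalpha)
  else
    let s := PySem.Str.upper s
    let key : String := "QWERTYUIOPASDFGHJKLZXCVBNM"
    let plain : String := "ABCDEFGHIJKLMNOPQRSTUVWXYZ"
    let p := if ciphtype == "d" then (key, plain) else (plain, key)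
    let s := (p.1.toList.zip p.2.toList).foldl
      (fun s ab => PySem.Str.replace s (String.ofList [ab.1]) (PySem.Str.lower (String.ofList [ab.2]))) s
    PySem.Str.upper s

-- ===== PRECONDITION & SPEC =====
-- Pre_ excludes exactly the inputs on which A raises: s empty or containing a non-alphabetic character.
def Pre_monoalpha (s : String) (ciphtype : String) : Prop := PySem.Str.strIsalpha s = true
instance (s : String) (ciphtype : String) : Decidable (Pre_monoalpha s ciphtype) := by
  unfold Pre_monoalpha; infer_instance
def pvWitness_monoalpha : String × String := ("Hello", "d")

def Spec_monoalpha (s : String) (ciphtype : String) (out : String) : Prop := out = monoalpha_alt s ciphtype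
instance (s : String) (ciphtype : String) (out : String) : Decidable (Spec_monoalpha s ciphtype out) := by unfold Spec_monoalpha; infer_instance

-- ===== CLAIM =====
def Claim_equal_monoalpha : Prop := ∀ (s : String) (ciphtype : String), Dom_monoalpha s ciphtype → Pre_monoalpha s ciphtype → Spec_monoalpha s ciphtype (monoalpha s ciphtype)

-- ===== LEMMAS AND PROOFS =====

-- A's per-character step, and B's per-character effect of the staged passes (proof-only helpers).
def aStep (src dst : List Char) (c : Char) : Char :=
  if src.contains c then
    (PySem.List.pyGet? dst (((PySem.List.index? src c).getD 0 : Nat) : Int)).getD c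
  else c

def bStep (ps : List (Char × Char)) (c : Char) : Char :=
  PySem.Chars.upperChar (ps.foldl (fun c ab => if c = ab.1 then PySem.Chars.lowerChar ab.2 else c) c)

-- replace with single-character old/new is a character map (worker, by fuel).
theorem go_single (o n : Char) : ∀ (fuel : Nat) (l acc : List Char), l.length ≤ fuel →
    PySem.Chars.replace.go [o] [n] fuel l acc
      = acc.reverse ++ l.map (fun c => if c = o then n else c) := by
  intro fuel
  induction fuel with
  | zero =>
    intro l acc h
    cases l with
    | nil => simp [PySem.Chars.replace.go]
    | cons c t => simp at h
  | succ f ih =>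
    intro l acc h
    cases l with
    | nil => simp [PySem.Chars.replace.go]
    | cons c t =>
      simp only [PySem.Chars.replace.go, List.isPrefixOf, Bool.and_true, List.map_cons]
      by_cases hc : o = c
      · subst hc
        simp only [beq_self_eq_true, if_true]
        rw [show List.drop [o].length (o :: t) = t by simp]
        rw [ih t ([n].reverse ++ acc) (by simpa using Nat.le_of_succ_le_succ h)]
        simp
      · have hbc : (o == c) = false := beq_false_of_ne hc
        rw [hbc]
        simp only [Bool.false_eq_true, if_false]
        rw [ih t (c :: acc) (by simpa using Nat.le_of_succ_le_succ h)]
        have hne : (if c = o then n else c) = c := if_neg (fun h' => hc h'.symm)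
        simp [hne]

theorem replace_single (o n : Char) (l : List Char) :
    PySem.Chars.replace l [o] [n] = l.map (fun c => if c = o then n else c) := by
  rw [PySem.Chars.replace]
  simp only [List.isEmpty_cons, if_false, Bool.false_eq_true]
  exact go_single o n l.length l [] le_rfl

-- bridge: the fold of string replaces, on toList.
theorem toList_fold_replace (ps : List (Char × Char)) (s : String) :
    ((ps.foldl (fun s ab =>
        PySem.Str.replace s (String.ofList [ab.1]) (PySem.Str.lower (String.ofList [ab.2]))) s)).toList
      = ps.foldl (fun l ab => PySem.Chars.replace l [ab.1] [PySem.Chars.lowerChar ab.2]) s.toList := by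
  induction ps generalizing s with
  | nil => rfl
  | cons ab t ih =>
    simp only [List.foldl_cons, ih]
    congr 1
    simp [PySem.Chars.lower, PySem.Str.toList_replace]

-- a fold of character maps is the map of the composed character fold.
theorem foldl_map_comm (ps : List (Char × Char)) (f : Char × Char → Char → Char) (l : List Char) :
    ps.foldl (fun l ab => l.map (f ab)) l = l.map (fun c => ps.foldl (fun c ab => f ab c) c) := by
  induction ps generalizing l with
  | nil => simp
  | cons ab t ih => simp [ih, Function.comp_def]

-- an alphabetic character uppercases into A..Z.
theorem alpha_upper_mem (c : Char) (h : PySem.Chars.isalpha c = true) :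
    PySem.Chars.upperChar c ∈ "ABCDEFGHIJKLMNOPQRSTUVWXYZ".toList := by
  have hrange : ∀ n : Nat, 65 ≤ n → n ≤ 90 →
      Char.ofNat n ∈ "ABCDEFGHIJKLMNOPQRSTUVWXYZ".toList := by
    intro n h1 h2
    have hl : "ABCDEFGHIJKLMNOPQRSTUVWXYZ".toList
        = (List.range 26).map (fun i => Char.ofNat (65 + i)) := by decide
    rw [hl]
    exact List.mem_map.mpr ⟨n - 65, List.mem_range.mpr (by omega), by congr 1; omega⟩
  unfold PySem.Chars.isalpha PySem.Chars.isupper PySem.Chars.islower at h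
  unfold PySem.Chars.upperChar PySem.Chars.islower
  by_cases hl : ('a' ≤ c ∧ c ≤ 'z')
  · have h97 : 97 ≤ c.toNat := hl.1
    have h122 : c.toNat ≤ 122 := hl.2
    simp only [hl.1, hl.2, decide_true, Bool.and_self, if_true]
    exact hrange _ (by omega) (by omega)
  · have hu : 'A' ≤ c ∧ c ≤ 'Z' := by
      rcases Bool.or_eq_true_iff.mp h with h' | h'
      · exact ⟨of_decide_eq_true (Bool.and_eq_true_iff.mp h').1,
          of_decide_eq_true (Bool.and_eq_true_iff.mp h').2⟩
      · exact absurd ⟨of_decide_eq_true (Bool.and_eq_true_iff.mp h').1,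
          of_decide_eq_true (Bool.and_eq_true_iff.mp h').2⟩ hl
    have h65 : 65 ≤ c.toNat := hu.1
    have h90 : c.toNat ≤ 90 := hu.2
    have : (decide ('a' ≤ c) && decide (c ≤ 'z')) = false := by
      rcases Decidable.not_and_iff_not_or_not.mp hl with h' | h' <;> simp [h']
    rw [this]
    simp only [Bool.false_eq_true, if_false]
    rw [← Char.ofNat_toNat c]
    exact hrange _ h65 h90

-- the two per-character steps agree on A..Z, for both alphabet orientations (finite check).
theorem step_agree_enc :
    ∀ c ∈ "ABCDEFGHIJKLMNOPQRSTUVWXYZ".toList,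
      aStep ("ABCDEFGHIJKLMNOPQRSTUVWXYZ".toList) ("QWERTYUIOPASDFGHJKLZXCVBNM".toList) c
        = bStep (("ABCDEFGHIJKLMNOPQRSTUVWXYZ".toList).zip ("QWERTYUIOPASDFGHJKLZXCVBNM".toList)) c := by
  have h : ("ABCDEFGHIJKLMNOPQRSTUVWXYZ".toList.all fun c =>
      aStep ("ABCDEFGHIJKLMNOPQRSTUVWXYZ".toList) ("QWERTYUIOPASDFGHJKLZXCVBNM".toList) c
        == bStep (("ABCDEFGHIJKLMNOPQRSTUVWXYZ".toList).zip ("QWERTYUIOPASDFGHJKLZXCVBNM".toList)) c)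
      = true := by
    set_option maxRecDepth 10000 in decide
  intro c hc
  exact eq_of_beq (List.all_eq_true.mp h c hc)

theorem step_agree_dec :
    ∀ c ∈ "ABCDEFGHIJKLMNOPQRSTUVWXYZ".toList,
      aStep ("QWERTYUIOPASDFGHJKLZXCVBNM".toList) ("ABCDEFGHIJKLMNOPQRSTUVWXYZ".toList) c
        = bStep (("QWERTYUIOPASDFGHJKLZXCVBNM".toList).zip ("ABCDEFGHIJKLMNOPQRSTUVWXYZ".toList)) c := by
  have h : ("ABCDEFGHIJKLMNOPQRSTUVWXYZ".toList.all fun c =>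
      aStep ("QWERTYUIOPASDFGHJKLZXCVBNM".toList) ("ABCDEFGHIJKLMNOPQRSTUVWXYZ".toList) c
        == bStep (("QWERTYUIOPASDFGHJKLZXCVBNM".toList).zip ("ABCDEFGHIJKLMNOPQRSTUVWXYZ".toList)) c)
      = true := by
    set_option maxRecDepth 10000 in decide
  intro c hc
  exact eq_of_beq (List.all_eq_true.mp h c hc)

-- both ports, reduced to maps over the uppercased character list, agree.
theorem sides_eq (src dst : List Char)
    (hstep : ∀ c ∈ "ABCDEFGHIJKLMNOPQRSTUVWXYZ".toList, aStep src dst c = bStep (src.zip dst) c)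
    (l : List Char) (hl : ∀ c ∈ l, PySem.Chars.isalpha c = true) :
    (PySem.Chars.upper l).foldl (fun fin i =>
        if src.contains i then
          fin ++ [(PySem.List.pyGet? dst (((PySem.List.index? src i).getD 0 : Nat) : Int)).getD i]
        else fin ++ [i]) []
      = PySem.Chars.upper ((src.zip dst).foldl
          (fun l ab => PySem.Chars.replace l [ab.1] [PySem.Chars.lowerChar ab.2])
          (PySem.Chars.upper l)) := by
  have hA : ∀ (acc : List Char), (PySem.Chars.upper l).foldl (fun fin i =>
      if src.contains i then
        fin ++ [(PySem.List.pyGet? dst (((PySem.List.index? src i).getD 0 : Nat) : Int)).getD i]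
      else fin ++ [i]) acc = acc ++ (PySem.Chars.upper l).map (aStep src dst) := by
    intro acc
    have : (fun (fin : List Char) i =>
        if src.contains i then
          fin ++ [(PySem.List.pyGet? dst (((PySem.List.index? src i).getD 0 : Nat) : Int)).getD i]
        else fin ++ [i]) = fun fin i => fin ++ [aStep src dst i] := by
      funext fin i; unfold aStep; split <;> rfl
    rw [this, PySem.List.foldl_append_singleton_eq_map]
  rw [hA]
  have hB : (fun (l : List Char) (ab : Char × Char) =>
      PySem.Chars.replace l [ab.1] [PySem.Chars.lowerChar ab.2])
      = fun l ab => l.map (fun c => if c = ab.1 then PySem.Chars.lowerChar ab.2 else c) := by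
    funext l ab; exact replace_single ab.1 (PySem.Chars.lowerChar ab.2) l
  rw [hB, foldl_map_comm]
  unfold PySem.Chars.upper
  simp only [List.map_map, List.nil_append]
  apply List.map_congr_left
  intro c hc
  have hmem : PySem.Chars.upperChar c ∈ "ABCDEFGHIJKLMNOPQRSTUVWXYZ".toList :=
    alpha_upper_mem c (hl c hc)
  simpa [bStep, Function.comp_def] using hstep _ hmem

-- ===== VERDICT =====
theorem monoalpha_spec : Claim_equal_monoalpha := by
  intro s ciphtype _ hpre
  unfold Spec_monoalpha monoalpha monoalpha_alt
  rw [hpre]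
  simp only [Bool.not_true, Bool.false_eq_true, if_false]
  have hA : (PySem.List.pyRange 65 91 1).map (fun i => Char.ofNat i.toNat)
      = "ABCDEFGHIJKLMNOPQRSTUVWXYZ".toList := by decide
  have halpha : ∀ c ∈ s.toList, PySem.Chars.isalpha c = true := by
    have h := hpre
    unfold Pre_monoalpha at h
    simp only [PySem.Str.strIsalpha_eq, PySem.Chars.strIsalpha, Bool.and_eq_true,
      List.all_eq_true] at h
    exact h.2
  have hup : (PySem.Str.upper s).toList = PySem.Chars.upper s.toList := by
    simp [PySem.Str.toList_upper]
  refine String.toList_inj.mp ?_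
  by_cases hd : ciphtype == "d"
  · simp only [hd, if_true, hA, String.toList_ofList, PySem.Str.toList_upper, toList_fold_replace]
    exact sides_eq _ _ step_agree_dec s.toList halpha
  · simp only [hd, Bool.false_eq_true, if_false, hA, String.toList_ofList,
      PySem.Str.toList_upper, toList_fold_replace]
    exact sides_eq _ _ step_agree_enc s.toList halpha
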